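-- pv_equiv track=rewrite | github.com/jrmanrique/codingproblems | uvaonlinejudge/python/p106.py | count
-- ===== SOURCE A (Python) =====
-- from math import sqrt
--
-- def get_relprimes(n):
--     def gcd(a, b):
--         while b:
--             a, b = b, a % b
--         return a
--
--     return [k for k in range(1, n) if gcd(n, k) == 1]
--
-- def count(limit, coprimehash):
--     hashtable = {k: False for k in range(1, limit + 1)}
--     primitives = 0
--     for m in range(2, int(sqrt(limit)) + 1):
--         if m not in coprimehash:
--             coprimehash[m] = get_relprimes(m)
--         for n in coprimehash[m]:
--             if n <= int(sqrt(limit - m ** 2)) and (m % 2) ^ (n % 2):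
--                 primitives += 1
--                 for k in range(1, limit):
--                     a = k * (m ** 2 - n ** 2)
--                     b = k * (2 * m * n)
--                     c = k * (m ** 2 + n ** 2)
--                     for x in (a, b, c):
--                         if x > limit:
--                             break
--                     else:
--                         for x in (a, b, c):
--                             hashtable[x] = True
--                         continue
--                     break
--     return primitives, limit - sum(hashtable.values())
-- ===== SOURCE B (Python) =====
-- from math import gcd, isqrt
--
-- def count(limit, coprimehash):
--     # stage 1: fill in every missing coprime list first (same mutation of coprimehash as A)
--     r = isqrt(limit)
--     for m in range(2, r + 1):
--         if m not in coprimehash: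
--             coprimehash[m] = [k for k in range(1, m) if gcd(m, k) == 1]
--     # stage 2: the generated triples, largest member last
--     triples = [(m * m - n * n, 2 * m * n, m * m + n * n)
--                for m in range(2, r + 1)
--                for n in coprimehash[m]
--                if n <= isqrt(limit - m * m) and (m + n) % 2 == 1]
--     # stage 3: level-synchronous sweep — for each multiplier k mark every still-alive
--     # triple at once, shrinking the worklist as k*c outgrows the limit
--     K = max((limit // c for (_, _, c) in triples), default=0)
--     covered = set()
--     alive = triples
--     for k in range(1, K + 1):
--         alive = [t for t in alive if k * t[2] <= limit]
--         covered.update(k * v for t in alive for v in t)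
--     return len(triples), limit - len(covered)
-- ===== Notes on version B (the rewrite author's own statement) =====
-- stated objective: alternative
-- what changed: B replaces A's nested m/n/k marking loops over a pre-initialised boolean dict (with the per-k tuple scan and for-else/break) by three stages: it prefills all missing coprime lists first (same mutation of coprimehash), builds the primitive-triple list with a single comprehension, and then transposes the marking loop - a level-synchronous sweep over the multiplier k that marks every still-alive triple at level k at once, shrinking the worklist as k*c outgrows the limit, accumulating covered numbers in a set instead of a dict over 1..limit.
import Mathlib
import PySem

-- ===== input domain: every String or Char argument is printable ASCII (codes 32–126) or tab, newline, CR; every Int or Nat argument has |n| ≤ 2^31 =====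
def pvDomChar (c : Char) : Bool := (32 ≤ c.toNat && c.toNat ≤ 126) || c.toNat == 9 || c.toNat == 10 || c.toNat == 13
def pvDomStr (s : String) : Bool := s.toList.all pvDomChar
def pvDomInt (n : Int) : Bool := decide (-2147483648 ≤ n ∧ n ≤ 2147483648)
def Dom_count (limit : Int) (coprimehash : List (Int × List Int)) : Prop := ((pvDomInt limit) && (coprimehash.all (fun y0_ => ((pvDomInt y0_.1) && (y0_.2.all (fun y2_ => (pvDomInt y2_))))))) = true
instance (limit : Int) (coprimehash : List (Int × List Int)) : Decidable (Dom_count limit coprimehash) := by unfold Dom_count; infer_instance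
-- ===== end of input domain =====

-- B replaces A's nested m/n/k marking loops over a boolean dict by three stages: prefill the
-- missing coprime lists, build the triple list by one comprehension, then a level-synchronous
-- sweep over the multiplier k marking all still-alive triples at once into a set; both A and B
-- mutate the coprimehash dict argument identically — the equivalence proved here is about the
-- RETURN value only.

-- ===== PORT A =====

-- termination of the Python gcd loop: |a % b| < |b| for b ≠ 0 (cited by pyGcd's decreasing_by)
theorem pyMod_natAbs_lt (a : Int) {b : Int} (hb : b ≠ 0) :
    (PySem.Int.mod a b).natAbs < b.natAbs := by
  rcases lt_or_gt_of_ne hb with h | h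
  · have := PySem.Int.mod_neg_bounds a h
    omega
  · have h1 := PySem.Int.mod_nonneg a h
    have h2 := PySem.Int.mod_lt a h
    omega

-- while b: a, b = b, a % b ; return a
def pyGcd (a b : Int) : Int :=
  if hb : b = 0 then a else pyGcd b (PySem.Int.mod a b)
termination_by b.natAbs
decreasing_by exact pyMod_natAbs_lt a hb

def get_relprimes (n : Int) : List Int :=
  (PySem.List.pyRange 1 n).filter (fun k => pyGcd n k == 1)

-- int(math.sqrt x): exact port for 0 ≤ x ≤ 2^31 (the Dom bound), where math.sqrt's correctly
-- rounded double gives int(sqrt(x)) = isqrt(x)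
def isqrtInt (x : Int) : Int := (Nat.sqrt x.toNat : Int)

-- the 'for k in range(1, limit)' loop with its tuple scan, break and for-else
def kloopA (limit m n : Int) (ks : List Int) (h : PySem.Dict Int Bool) : PySem.Dict Int Bool :=
  match ks with
  | [] => h
  | k :: rest =>
      if k * (m ^ 2 - n ^ 2) > limit then h
      else if k * (2 * m * n) > limit then h
      else if k * (m ^ 2 + n ^ 2) > limit then h
      else kloopA limit m n rest
        (((h.insert (k * (m ^ 2 - n ^ 2)) true).insert (k * (2 * m * n)) true).insert
          (k * (m ^ 2 + n ^ 2)) true)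

-- for n in coprimehash[m]: ...
def innerA (limit m : Int) (ns : List Int) (st : Int × PySem.Dict Int Bool) :
    Int × PySem.Dict Int Bool :=
  ns.foldl (fun st n =>
    if n ≤ isqrtInt (limit - m ^ 2) ∧
        PySem.Int.bxor (PySem.Int.mod m 2) (PySem.Int.mod n 2) ≠ 0 then
      (st.1 + 1, kloopA limit m n (PySem.List.pyRange 1 limit) st.2)
    else st) st

-- if m not in coprimehash: coprimehash[m] = get_relprimes(m)
def ensure (ch : PySem.Dict Int (List Int)) (m : Int) : PySem.Dict Int (List Int) :=
  if ch.contains m then ch else ch.insert m (get_relprimes m)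

-- one iteration of 'for m in range(2, int(sqrt(limit)) + 1)'
def stepA (limit : Int) (st : PySem.Dict Int (List Int) × Int × PySem.Dict Int Bool) (m : Int) :
    PySem.Dict Int (List Int) × Int × PySem.Dict Int Bool :=
  let ch := ensure st.1 m
  -- coprimehash[m]: the .getD [] default is unreachable (m was just ensured present)
  let pr := innerA limit m ((ch.get? m).getD []) (st.2.1, st.2.2)
  (ch, pr.1, pr.2)

def count (limit : Int) (coprimehash : List (Int × List Int)) : Int × Int :=
  let hashtable : PySem.Dict Int Bool :=
    (PySem.List.pyRange 1 (limit + 1)).foldl (fun d k => d.insert k false) PySem.Dict.empty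
  let st := (PySem.List.pyRange 2 (isqrtInt limit + 1)).foldl (stepA limit)
      (PySem.Dict.ofList coprimehash, 0, hashtable)
  (st.2.1, limit - st.2.2.values.foldl (fun s v => s + if v then 1 else 0) 0)

-- ===== PORT B =====

-- [k for k in range(1, m) if gcd(m, k) == 1], with math.gcd (m, k ≥ 0 here)
def relprimesB (n : Int) : List Int :=
  (PySem.List.pyRange 1 n).filter (fun k => (Int.gcd n k : Int) == 1)

-- stage 1, one m: if m not in coprimehash: coprimehash[m] = [...]
def ensureB (ch : PySem.Dict Int (List Int)) (m : Int) : PySem.Dict Int (List Int) :=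
  if ch.contains m then ch else ch.insert m (relprimesB m)

-- stage 2: the triple-list comprehension over the prefilled dict
def triplesB (limit : Int) (ch : PySem.Dict Int (List Int)) : List (Int × Int × Int) :=
  (PySem.List.pyRange 2 (isqrtInt limit + 1)).flatMap (fun m =>
    (((ch.get? m).getD []).filter
        (fun n => decide (n ≤ isqrtInt (limit - m * m)) && (PySem.Int.mod (m + n) 2 == 1))).map
      (fun n => (m * m - n * n, 2 * m * n, m * m + n * n)))

-- stage 3, one level k: shrink the worklist, then mark k times every alive triple
def levelStep (limit : Int) (st : List (Int × Int × Int) × PySem.Set Int) (k : Int) :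
    List (Int × Int × Int) × PySem.Set Int :=
  let alive := st.1.filter (fun t => decide (k * t.2.2 ≤ limit))
  (alive, alive.foldl (fun S t => ((S.add (k * t.1)).add (k * t.2.1)).add (k * t.2.2)) st.2)

def count_alt (limit : Int) (coprimehash : List (Int × List Int)) : Int × Int :=
  let ch := (PySem.List.pyRange 2 (isqrtInt limit + 1)).foldl ensureB
      (PySem.Dict.ofList coprimehash)
  let triples := triplesB limit ch
  -- max((limit // c for (_,_,c) in triples), default=0): exact as foldl max 0 since every
  -- limit // c is ≥ 0 on the admitted inputs (limit ≥ 0, c = m*m+n*n ≥ 4)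
  let K := triples.foldl (fun acc t => max acc (PySem.Int.floordiv limit t.2.2)) 0
  let covered :=
    ((PySem.List.pyRange 1 (K + 1)).foldl (levelStep limit) (triples, PySem.Set.empty)).2
  ((triples.length : Int), limit - (covered.length : Int))

-- ===== PRECONDITION & SPEC =====

-- Pre_ excludes exactly limit < 0, where A raises ValueError (math.sqrt of a negative number).
def Pre_count (limit : Int) (coprimehash : List (Int × List Int)) : Prop := 0 ≤ limit
instance (limit : Int) (coprimehash : List (Int × List Int)) :
    Decidable (Pre_count limit coprimehash) := by unfold Pre_count; infer_instance

def pvWitness_count : Int × (List (Int × List Int)) := (6, [(2, [1])])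

def Spec_count (limit : Int) (coprimehash : List (Int × List Int)) (out : Int × Int) : Prop :=
  out = count_alt limit coprimehash
instance (limit : Int) (coprimehash : List (Int × List Int)) (out : Int × Int) :
    Decidable (Spec_count limit coprimehash out) := by unfold Spec_count; infer_instance

-- ===== CLAIM (what is proved, stated in full; the proofs are below) =====
def Claim_equal_count : Prop := ∀ (limit : Int) (coprimehash : List (Int × List Int)),
  Dom_count limit coprimehash → Pre_count limit coprimehash →
  Spec_count limit coprimehash (count limit coprimehash)

-- ===== LEMMAS AND PROOFS =====

-- B's guard and triple, as named functions (proof bookkeeping only)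
def gB (limit m : Int) : Int → Bool :=
  fun n => decide (n ≤ isqrtInt (limit - m * m)) && (PySem.Int.mod (m + n) 2 == 1)
def tripB (m : Int) : Int → Int × Int × Int :=
  fun n => (m * m - n * n, 2 * m * n, m * m + n * n)

-- proof-only intermediate: A's m-iteration with B's bookkeeping (dict + appended triples)
def stepT (limit : Int) (st : PySem.Dict Int (List Int) × List (Int × Int × Int)) (m : Int) :
    PySem.Dict Int (List Int) × List (Int × Int × Int) :=
  let ch := ensure st.1 m
  (ch, st.2 ++ (((ch.get? m).getD []).filter (gB limit m)).map (tripB m))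

-- proof-only: per-triple coverage in A's order
def coverTriple (limit : Int) (S : PySem.Set Int) (t : Int × Int × Int) : PySem.Set Int :=
  (PySem.List.pyRange 1 (PySem.Int.floordiv limit t.2.2 + 1)).foldl
    (fun S k => ((S.add (k * t.1)).add (k * t.2.1)).add (k * t.2.2)) S

theorem gcd_step (a b : Int) (ha : 0 ≤ a) (hb : 0 < b) :
    Int.gcd a b = Int.gcd b (a % b) := by
  rw [Int.gcd, Int.gcd, Nat.gcd_comm a.natAbs, Nat.gcd_rec b.natAbs a.natAbs,
    Nat.gcd_comm (a.natAbs % b.natAbs)]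
  congr 1
  have h1 := Int.emod_nonneg a (by omega : b ≠ 0)
  have h2 := Int.emod_lt_of_pos a hb
  have h3 : ((a.natAbs % b.natAbs : Nat) : Int) = a % b := by
    push_cast [Int.natAbs_of_nonneg ha, Int.natAbs_of_nonneg hb.le]
    ring
  omega

-- the hand-written while-loop gcd of A is math.gcd of B on nonnegative arguments
theorem pyGcd_eq_gcd_aux : ∀ (N : Nat) (a b : Int), b.natAbs ≤ N → 0 ≤ a → 0 ≤ b →
    pyGcd a b = (Int.gcd a b : Int) := by
  intro N
  induction N with
  | zero =>
      intro a b hN ha hb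
      have hb0 : b = 0 := by omega
      subst hb0
      rw [pyGcd]
      simp [Int.gcd, Int.natAbs_of_nonneg ha]
  | succ N ih =>
      intro a b hN ha hb
      rw [pyGcd]
      split
      · rename_i h
        subst h
        simp [Int.gcd, Int.natAbs_of_nonneg ha]
      · rename_i h
        have hbp : 0 < b := lt_of_le_of_ne hb (Ne.symm h)
        have h1 := Int.emod_nonneg a h
        have h2 := Int.emod_lt_of_pos a hbp
        rw [PySem.Int.mod_eq_emod_of_pos hbp,
          ih b (a % b) (by omega) hb h1, gcd_step a b ha hbp]

theorem pyGcd_eq_gcd (a b : Int) (ha : 0 ≤ a) (hb : 0 ≤ b) :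
    pyGcd a b = (Int.gcd a b : Int) :=
  pyGcd_eq_gcd_aux b.natAbs a b le_rfl ha hb

theorem relprimes_eq (m : Int) : get_relprimes m = relprimesB m := by
  rw [get_relprimes, relprimesB]
  apply List.filter_congr
  intro k hk
  rw [PySem.List.mem_pyRange_one] at hk
  rw [pyGcd_eq_gcd m k (by omega) (by omega)]

theorem ensure_eq_ensureB : ensure = ensureB := by
  funext ch m
  rw [ensure, ensureB, relprimes_eq]

-- invariant tying A's hashtable to the covered set: keys unique, the set unique, and an entry
-- is True exactly on the set's members
def InvH (h : PySem.Dict Int Bool) (S : List Int) : Prop :=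
  h.keys.Nodup ∧ S.Nodup ∧ ∀ i : Int, (h.getD i false = true ↔ i ∈ S)

theorem invH_insert (h : PySem.Dict Int Bool) (S : List Int) (x : Int) (hI : InvH h S) :
    InvH (h.insert x true) (PySem.Set.add S x) := by
  obtain ⟨hk, hs, hv⟩ := hI
  refine ⟨PySem.Dict.nodup_keys_insert h x true hk, PySem.Set.nodup_add S x hs, ?_⟩
  intro i
  rw [PySem.Dict.getD_insert, PySem.Set.mem_add]
  by_cases hix : i = x
  · simp [hix]
  · simp [hix, hv i]

theorem invH_fold_triple (a b c : Int) (ks : List Int) :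
    ∀ (h : PySem.Dict Int Bool) (S : List Int), InvH h S →
    InvH
      (ks.foldl (fun h k =>
        ((h.insert (k * a) true).insert (k * b) true).insert (k * c) true) h)
      (ks.foldl (fun S k =>
        PySem.Set.add (PySem.Set.add (PySem.Set.add S (k * a)) (k * b)) (k * c)) S) := by
  induction ks with
  | nil => exact fun h S hI => hI
  | cons k rest ih =>
      intro h S hI
      exact ih _ _ (invH_insert _ _ _ (invH_insert _ _ _ (invH_insert _ _ _ hI)))

-- Python's (m % 2) ^ (n % 2) is truthy exactly when (m + n) % 2 == 1
theorem parity_iff (m n : Int) :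
    PySem.Int.bxor (PySem.Int.mod m 2) (PySem.Int.mod n 2) ≠ 0 ↔
      PySem.Int.mod (m + n) 2 = 1 := by
  have h2 : (0:Int) < 2 := by norm_num
  rw [PySem.Int.mod_eq_emod_of_pos h2, PySem.Int.mod_eq_emod_of_pos h2,
      PySem.Int.mod_eq_emod_of_pos h2]
  have hm : m % 2 = 0 ∨ m % 2 = 1 := by omega
  have hn : n % 2 = 0 ∨ n % 2 = 1 := by omega
  rcases hm with hm | hm <;> rcases hn with hn | hn <;> rw [hm, hn] <;>
    simp only [show PySem.Int.bxor 0 0 = 0 from by decide,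
      show PySem.Int.bxor 0 1 = 1 from by decide,
      show PySem.Int.bxor 1 0 = 1 from by decide,
      show PySem.Int.bxor 1 1 = 0 from by decide] <;>
    constructor <;> intro hx <;> omega

-- A's guard and B's guard agree
theorem guard_iff (limit m n : Int) :
    (n ≤ isqrtInt (limit - m ^ 2) ∧
      PySem.Int.bxor (PySem.Int.mod m 2) (PySem.Int.mod n 2) ≠ 0) ↔
    gB limit m n = true := by
  rw [gB, show m ^ 2 = m * m from pow_two m]
  simp only [Bool.and_eq_true, decide_eq_true_eq, beq_iff_eq]
  exact and_congr_right (fun _ => parity_iff m n)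

-- the k-loop never breaks while k*c stays within limit (c is the largest of the three)
theorem kloopA_no_break (limit m n : Int) (ks rest : List Int)
    (hks : ∀ k ∈ ks, 0 ≤ k ∧ k * (m ^ 2 + n ^ 2) ≤ limit) :
    ∀ h, kloopA limit m n (ks ++ rest) h =
      kloopA limit m n rest
        (ks.foldl (fun h k =>
          ((h.insert (k * (m ^ 2 - n ^ 2)) true).insert (k * (2 * m * n)) true).insert
            (k * (m ^ 2 + n ^ 2)) true) h) := by
  induction ks with
  | nil => intro h; rfl
  | cons k ks ih =>
      intro h
      obtain ⟨hk0, hkc⟩ := hks k (by simp)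
      have hac : k * (m ^ 2 - n ^ 2) ≤ k * (m ^ 2 + n ^ 2) := by
        apply mul_le_mul_of_nonneg_left _ hk0
        nlinarith [sq_nonneg n]
      have hbc : k * (2 * m * n) ≤ k * (m ^ 2 + n ^ 2) := by
        apply mul_le_mul_of_nonneg_left _ hk0
        nlinarith [sq_nonneg (m - n)]
      rw [List.cons_append, kloopA]
      rw [if_neg (not_lt.mpr (le_trans hac hkc)), if_neg (not_lt.mpr (le_trans hbc hkc)),
        if_neg (not_lt.mpr hkc), List.foldl_cons]
      exact ih (fun k hk => hks k (List.mem_cons_of_mem _ hk)) _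

theorem kloopA_break (limit m n k : Int) (rest : List Int) (h : PySem.Dict Int Bool)
    (hc : limit < k * (m ^ 2 + n ^ 2)) :
    kloopA limit m n (k :: rest) h = h := by
  rw [kloopA]
  by_cases h1 : k * (m ^ 2 - n ^ 2) > limit
  · rw [if_pos h1]
  · rw [if_neg h1]
    by_cases h2 : k * (2 * m * n) > limit
    · rw [if_pos h2]
    · rw [if_neg h2, if_pos hc]

-- the break-on-overflow loop marks exactly the multiples with k in 1 .. limit // c
theorem kloopA_eq (limit m n : Int) (hl : 0 ≤ limit) (hm : 2 ≤ m) (h : PySem.Dict Int Bool) :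
    kloopA limit m n (PySem.List.pyRange 1 limit) h =
      (PySem.List.pyRange 1 (PySem.Int.floordiv limit (m ^ 2 + n ^ 2) + 1)).foldl
        (fun h k =>
          ((h.insert (k * (m ^ 2 - n ^ 2)) true).insert (k * (2 * m * n)) true).insert
            (k * (m ^ 2 + n ^ 2)) true) h := by
  have hc4 : (4:Int) ≤ m ^ 2 + n ^ 2 := by nlinarith [sq_nonneg n]
  have hcpos : (0:Int) < m ^ 2 + n ^ 2 := by omega
  set c := m ^ 2 + n ^ 2 with hcdef
  set q := PySem.Int.floordiv limit c with hqdef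
  have hq0 : 0 ≤ q := (PySem.Int.le_floordiv_iff_mul_le hcpos).mpr (by nlinarith)
  have hqc : q * c ≤ limit := (PySem.Int.le_floordiv_iff_mul_le hcpos).mp le_rfl
  by_cases hlim : limit < 2
  · have h1 : PySem.List.pyRange 1 limit = [] := PySem.List.pyRange_one_eq_nil (by omega)
    have hq1 : q < 1 := (PySem.Int.floordiv_lt_iff_lt_mul hcpos).mpr (by nlinarith)
    have hr : PySem.List.pyRange 1 (q + 1) = [] := PySem.List.pyRange_one_eq_nil (by omega)
    rw [h1, hr]
    rfl
  · push_neg at hlim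
    have hqlt : q < limit := (PySem.Int.floordiv_lt_iff_lt_mul hcpos).mpr (by nlinarith)
    have hpre : ∀ k ∈ PySem.List.pyRange 1 (q + 1), 0 ≤ k ∧ k * c ≤ limit := by
      intro k hk
      rw [PySem.List.mem_pyRange_one] at hk
      refine ⟨by omega, le_trans ?_ hqc⟩
      exact mul_le_mul_of_nonneg_right (by omega) (by omega)
    rw [PySem.List.pyRange_one_append 1 (q + 1) limit (by omega) (by omega),
      kloopA_no_break limit m n _ _ hpre h]
    rcases lt_or_ge (q + 1) limit with htl | htl
    · rw [PySem.List.pyRange_one_cons htl]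
      exact kloopA_break _ _ _ _ _ _
        ((PySem.Int.floordiv_lt_iff_lt_mul hcpos).mp (by omega))
    · rw [PySem.List.pyRange_one_eq_nil htl]
      rfl

-- the inner n-loop: A's primitives counter and hashtable match the filtered triples
theorem innerA_eq (limit m : Int) (hl : 0 ≤ limit) (hm : 2 ≤ m) (ns : List Int) :
    ∀ (p : Int) (h : PySem.Dict Int Bool) (S : List Int), InvH h S →
    (innerA limit m ns (p, h)).1 = p + ((ns.filter (gB limit m)).length : Int) ∧
    InvH (innerA limit m ns (p, h)).2
      (((ns.filter (gB limit m)).map (tripB m)).foldl (coverTriple limit) S) := by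
  induction ns with
  | nil => intro p h S hI; exact ⟨by simp [innerA], by simpa [innerA] using hI⟩
  | cons n ns ih =>
      intro p h S hI
      by_cases hg : (n ≤ isqrtInt (limit - m ^ 2) ∧
          PySem.Int.bxor (PySem.Int.mod m 2) (PySem.Int.mod n 2) ≠ 0)
      · have hg' : gB limit m n = true := (guard_iff limit m n).mp hg
        have hstep : innerA limit m (n :: ns) (p, h) =
            innerA limit m ns (p + 1, kloopA limit m n (PySem.List.pyRange 1 limit) h) := by
          simp only [innerA, List.foldl_cons, if_pos hg]
        have hcov : coverTriple limit S (tripB m n) =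
            (PySem.List.pyRange 1 (PySem.Int.floordiv limit (m * m + n * n) + 1)).foldl
              (fun S k =>
                PySem.Set.add (PySem.Set.add (PySem.Set.add S (k * (m * m - n * n)))
                  (k * (2 * m * n))) (k * (m * m + n * n))) S := rfl
        have hk := kloopA_eq limit m n hl hm h
        rw [show m ^ 2 = m * m from pow_two m, show n ^ 2 = n * n from pow_two n] at hk
        obtain ⟨ih1, ih2⟩ := ih (p + 1)
          (kloopA limit m n (PySem.List.pyRange 1 limit) h)
          (coverTriple limit S (tripB m n))
          (by rw [hk, hcov]; exact invH_fold_triple _ _ _ _ h S hI)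
        refine ⟨?_, ?_⟩
        · rw [hstep, ih1, List.filter_cons_of_pos hg']
          push_cast [List.length_cons]
          ring
        · rw [hstep, List.filter_cons_of_pos hg', List.map_cons, List.foldl_cons]
          exact ih2
      · have hg' : gB limit m n = false := by
          rw [← Bool.not_eq_true]
          exact fun hc => hg ((guard_iff limit m n).mpr hc)
        have hstep : innerA limit m (n :: ns) (p, h) = innerA limit m ns (p, h) := by
          simp only [innerA, List.foldl_cons, if_neg hg]
        rw [hstep, List.filter_cons_of_neg (by simp [hg'])]
        exact ih p h S hI

-- the stepT fold only appends to the triples accumulator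
theorem stepT_fold_append (limit : Int) (ms : List Int) :
    ∀ (ch : PySem.Dict Int (List Int)) (ts : List (Int × Int × Int)),
      ms.foldl (stepT limit) (ch, ts) =
        ((ms.foldl (stepT limit) (ch, [])).1,
          ts ++ (ms.foldl (stepT limit) (ch, [])).2) := by
  induction ms with
  | nil => intro ch ts; simp
  | cons m ms ih =>
      intro ch ts
      rw [List.foldl_cons, List.foldl_cons]
      have h1 : stepT limit (ch, ts) m =
          ((stepT limit (ch, []) m).1, ts ++ (stepT limit (ch, []) m).2) := by
        simp [stepT]
      rw [h1, ih (stepT limit (ch, []) m).1 (ts ++ (stepT limit (ch, []) m).2),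
        ih (stepT limit (ch, []) m).1 (stepT limit (ch, []) m).2]
      simp [List.append_assoc]

-- A's outer m-loop against the stepT fold, in lock-step
theorem outer_eq (limit : Int) (hl : 0 ≤ limit) (ms : List Int) :
    ∀ (_ : ∀ m ∈ ms, 2 ≤ m) (ch : PySem.Dict Int (List Int)) (p : Int)
      (h : PySem.Dict Int Bool) (S : List Int), InvH h S →
    (ms.foldl (stepA limit) (ch, p, h)).1 = (ms.foldl (stepT limit) (ch, [])).1 ∧
    (ms.foldl (stepA limit) (ch, p, h)).2.1 =
      p + ((ms.foldl (stepT limit) (ch, [])).2.length : Int) ∧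
    InvH (ms.foldl (stepA limit) (ch, p, h)).2.2
      ((ms.foldl (stepT limit) (ch, [])).2.foldl (coverTriple limit) S) := by
  induction ms with
  | nil => intro _ ch p h S hI; exact ⟨rfl, by simp, hI⟩
  | cons m ms ih =>
      intro hms ch p h S hI
      have hm : 2 ≤ m := hms m (List.mem_cons_self ..)
      obtain ⟨h1, h2⟩ := innerA_eq limit m hl hm (((ensure ch m).get? m).getD []) p h S hI
      obtain ⟨ih1, ih2, ih3⟩ := ih (fun x hx => hms x (List.mem_cons_of_mem _ hx)) (ensure ch m)
        (innerA limit m (((ensure ch m).get? m).getD []) (p, h)).1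
        (innerA limit m (((ensure ch m).get? m).getD []) (p, h)).2
        ((((((ensure ch m).get? m).getD []).filter (gB limit m)).map
          (tripB m)).foldl (coverTriple limit) S) h2
      have hA : stepA limit (ch, p, h) m = (ensure ch m,
          (innerA limit m (((ensure ch m).get? m).getD []) (p, h)).1,
          (innerA limit m (((ensure ch m).get? m).getD []) (p, h)).2) := rfl
      have hB : stepT limit (ch, []) m = (ensure ch m,
          [] ++ ((((ensure ch m).get? m).getD []).filter (gB limit m)).map (tripB m)) := rfl
      rw [List.foldl_cons, List.foldl_cons, hA, hB,
        stepT_fold_append limit ms (ensure ch m)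
          ([] ++ ((((ensure ch m).get? m).getD []).filter (gB limit m)).map (tripB m))]
      refine ⟨ih1, ?_, ?_⟩
      · rw [ih2, h1]
        simp only [List.nil_append, List.length_append, List.length_map]
        push_cast
        ring
      · simp only [List.nil_append]
        rw [List.foldl_append]
        exact ih3

theorem getD_empty (i : Int) : (PySem.Dict.empty : PySem.Dict Int Bool).getD i false = false :=
  rfl

theorem getD_false_fold (l : List Int) :
    ∀ d : PySem.Dict Int Bool, (∀ i, d.getD i false = false) →
      ∀ i, (l.foldl (fun d k => d.insert k false) d).getD i false = false := by
  induction l with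
  | nil => exact fun d hd => hd
  | cons k l ih =>
      intro d hd i
      rw [List.foldl_cons]
      refine ih _ (fun j => ?_) i
      rw [PySem.Dict.getD_insert]
      split
      · rfl
      · exact hd j

-- sum(hashtable.values()) counts exactly the members of the covered set
theorem sum_values_eq (h : PySem.Dict Int Bool) (S : List Int) (hI : InvH h S) :
    h.values.foldl (fun s v => s + if v then 1 else 0) 0 = (S.length : Int) := by
  obtain ⟨hk, hs, hv⟩ := hI
  rw [PySem.Dict.values_eq_map_keys h hk false, List.foldl_map]
  have hrw : ∀ (s : Int) (k : Int),
      (s + if h.getD k false then (1:Int) else 0) =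
        if (fun k => h.getD k false) k = true then s + 1 else s := by
    intro s k
    by_cases hb : h.getD k false <;> simp [hb]
  simp only [hrw]
  rw [PySem.List.foldl_count_if (fun k => h.getD k false) h.keys 0, zero_add,
    List.countP_eq_length_filter]
  have hmemk : ∀ a : Int, a ∈ S → a ∈ h.keys := by
    intro a ha
    have hb : h.getD a false = true := (hv a).mpr ha
    by_contra hmem
    have hcf : h.contains a = false := by
      rw [← Bool.not_eq_true, PySem.Dict.contains_iff_mem_keys]
      exact hmem
    have : h.get? a = none := (PySem.Dict.get?_eq_none_iff_contains h a).mpr hcf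
    rw [PySem.Dict.getD_eq_get?_getD, this] at hb
    exact Bool.false_ne_true hb
  have hperm : (h.keys.filter (fun k => h.getD k false)).Perm S := by
    rw [List.perm_ext_iff_of_nodup (hk.filter _) hs]
    intro a
    simp only [List.mem_filter]
    constructor
    · rintro ⟨-, hb⟩
      exact (hv a).mp hb
    · intro ha
      exact ⟨hmemk a ha, (hv a).mpr ha⟩
  rw [hperm.length_eq]

-- ensure only touches key m
theorem get?_foldl_ensure_not_mem (ms : List Int) :
    ∀ (ch : PySem.Dict Int (List Int)) (m : Int), m ∉ ms →
      (ms.foldl ensure ch).get? m = ch.get? m := by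
  induction ms with
  | nil => intro ch m _; rfl
  | cons m' rest ih =>
      intro ch m h
      simp only [List.mem_cons, not_or] at h
      rw [List.foldl_cons, ih _ m h.2, ensure]
      split
      · rfl
      · rw [PySem.Dict.get?_insert, if_neg h.1]

-- the triples collected by the stepT fold are B's comprehension over the prefilled dict
theorem stepT_fold_snd (limit : Int) (ms : List Int) :
    ∀ (ch : PySem.Dict Int (List Int)), ms.Nodup →
      (ms.foldl (stepT limit) (ch, [])).2 =
        ms.flatMap (fun m =>
          ((((ms.foldl ensure ch).get? m).getD []).filter (gB limit m)).map (tripB m)) := by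
  induction ms with
  | nil => intro ch _; rfl
  | cons m rest ih =>
      intro ch hnd
      rw [List.nodup_cons] at hnd
      rw [List.foldl_cons, List.flatMap_cons]
      have hhd : stepT limit (ch, []) m = (ensure ch m,
          (((ensure ch m).get? m).getD []).filter (gB limit m) |>.map (tripB m)) := by
        simp [stepT]
      rw [hhd, stepT_fold_append, ih (ensure ch m) hnd.2, List.foldl_cons,
        get?_foldl_ensure_not_mem rest (ensure ch m) m hnd.1]

-- membership in a triple-marking fold of Set.adds
theorem mem_fold_add3 {α : Type} (f g h : α → Int) (ks : List α) :
    ∀ (S : PySem.Set Int) (x : Int),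
      (x ∈ ks.foldl (fun S k => ((S.add (f k)).add (g k)).add (h k)) S) ↔
        x ∈ S ∨ ∃ k ∈ ks, x = f k ∨ x = g k ∨ x = h k := by
  induction ks with
  | nil => simp
  | cons k rest ih =>
      intro S x
      rw [List.foldl_cons, ih, List.exists_mem_cons_iff]
      simp only [PySem.Set.mem_add]
      simp [or_assoc]

theorem nodup_fold_add3 {α : Type} (f g h : α → Int) (ks : List α) :
    ∀ (S : PySem.Set Int), S.Nodup →
      (ks.foldl (fun S k => ((S.add (f k)).add (g k)).add (h k)) S).Nodup := by
  induction ks with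
  | nil => exact fun S hS => hS
  | cons k rest ih =>
      intro S hS
      exact ih _ (PySem.Set.nodup_add _ _ (PySem.Set.nodup_add _ _
        (PySem.Set.nodup_add _ _ hS)))

-- membership in A's per-triple coverage fold
theorem mem_coverTriple_fold (limit : Int) (ts : List (Int × Int × Int)) :
    ∀ (S : PySem.Set Int) (x : Int),
      (x ∈ ts.foldl (coverTriple limit) S) ↔
        x ∈ S ∨ ∃ t ∈ ts, ∃ k, 1 ≤ k ∧ k ≤ PySem.Int.floordiv limit t.2.2 ∧
          (x = k * t.1 ∨ x = k * t.2.1 ∨ x = k * t.2.2) := by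
  induction ts with
  | nil => simp
  | cons t rest ih =>
      intro S x
      rw [List.foldl_cons, ih, List.exists_mem_cons_iff, coverTriple,
        mem_fold_add3 (fun k => k * t.1) (fun k => k * t.2.1) (fun k => k * t.2.2)]
      simp only [PySem.List.mem_pyRange_one, Int.lt_add_one_iff]
      simp [or_assoc, and_assoc]

-- membership in B's level-synchronous sweep
theorem mem_levels (limit : Int) (T : List (Int × Int × Int))
    (hT : ∀ t ∈ T, 0 < t.2.2) :
    ∀ (b a : Int), 1 ≤ a →
      ∀ (S : PySem.Set Int) (x : Int),
        (x ∈ ((PySem.List.pyRange a b 1).foldl (levelStep limit)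
            (T.filter (fun t => decide ((a - 1) * t.2.2 ≤ limit)), S)).2) ↔
          x ∈ S ∨ ∃ k, a ≤ k ∧ k < b ∧ ∃ t ∈ T, k * t.2.2 ≤ limit ∧
            (x = k * t.1 ∨ x = k * t.2.1 ∨ x = k * t.2.2) := by
  have haux : ∀ (N : Nat) (b a : Int), (b - a).toNat ≤ N → 1 ≤ a →
      ∀ (S : PySem.Set Int) (x : Int),
        (x ∈ ((PySem.List.pyRange a b 1).foldl (levelStep limit)
            (T.filter (fun t => decide ((a - 1) * t.2.2 ≤ limit)), S)).2) ↔
          x ∈ S ∨ ∃ k, a ≤ k ∧ k < b ∧ ∃ t ∈ T, k * t.2.2 ≤ limit ∧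
            (x = k * t.1 ∨ x = k * t.2.1 ∨ x = k * t.2.2) := by
    intro N
    induction N with
    | zero =>
        intro b a hN ha S x
        rw [PySem.List.pyRange_one_eq_nil (by omega), List.foldl_nil]
        constructor
        · exact Or.inl
        · rintro (hS | ⟨k, h1, h2, -⟩)
          · exact hS
          · omega
    | succ N ih =>
        intro b a hN ha S x
        by_cases hba : b ≤ a
        · rw [PySem.List.pyRange_one_eq_nil hba, List.foldl_nil]
          constructor
          · exact Or.inl
          · rintro (hS | ⟨k, h1, h2, -⟩)
            · exact hS
            · omega
        · push_neg at hba
          rw [PySem.List.pyRange_one_cons hba, List.foldl_cons]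
          have hfilt : (T.filter (fun t => decide ((a - 1) * t.2.2 ≤ limit))).filter
                (fun t => decide (a * t.2.2 ≤ limit)) =
              T.filter (fun t => decide (a * t.2.2 ≤ limit)) := by
            rw [List.filter_filter]
            apply List.filter_congr
            intro t ht
            have hc := hT t ht
            by_cases hq : a * t.2.2 ≤ limit
            · have hq' : (a - 1) * t.2.2 ≤ limit := by nlinarith
              simp [hq, hq']
            · simp [hq]
          have hstep : levelStep limit
                (T.filter (fun t => decide ((a - 1) * t.2.2 ≤ limit)), S) a =
              (T.filter (fun t => decide (a * t.2.2 ≤ limit)),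
                (T.filter (fun t => decide (a * t.2.2 ≤ limit))).foldl
                  (fun S t => ((S.add (a * t.1)).add (a * t.2.1)).add (a * t.2.2)) S) := by
            simp only [levelStep, hfilt]
          rw [hstep]
          have ha1 : a + 1 - 1 = a := by ring
          have hIH := ih b (a + 1) (by omega) (by omega)
            ((T.filter (fun t => decide (a * t.2.2 ≤ limit))).foldl
              (fun S t => ((S.add (a * t.1)).add (a * t.2.1)).add (a * t.2.2)) S) x
          rw [ha1] at hIH
          rw [hIH, mem_fold_add3 (α := Int × Int × Int) (fun t => a * t.1)
            (fun t => a * t.2.1) (fun t => a * t.2.2)]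
          constructor
          · rintro ((hS | ⟨t, ht, hx⟩) | ⟨k, hk1, hk2, t, ht, hq, hx⟩)
            · exact Or.inl hS
            · rw [List.mem_filter, decide_eq_true_eq] at ht
              exact Or.inr ⟨a, le_rfl, hba, t, ht.1, ht.2, hx⟩
            · exact Or.inr ⟨k, by omega, hk2, t, ht, hq, hx⟩
          · rintro (hS | ⟨k, hk1, hk2, t, ht, hq, hx⟩)
            · exact Or.inl (Or.inl hS)
            · rcases eq_or_lt_of_le hk1 with hka | hka
              · subst hka
                exact Or.inl (Or.inr ⟨t, List.mem_filter.mpr ⟨ht, by simpa using hq⟩, hx⟩)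
              · exact Or.inr ⟨k, by omega, hk2, t, ht, hq, hx⟩
  intro b a ha S x
  exact haux (b - a).toNat b a le_rfl ha S x

theorem nodup_levels (limit : Int) (ks : List Int) :
    ∀ (st : List (Int × Int × Int) × PySem.Set Int), st.2.Nodup →
      ((ks.foldl (levelStep limit) st).2).Nodup := by
  induction ks with
  | nil => exact fun st h => h
  | cons k rest ih =>
      intro st hS
      rw [List.foldl_cons]
      exact ih _ (nodup_fold_add3 (α := Int × Int × Int) (fun t => k * t.1)
        (fun t => k * t.2.1) (fun t => k * t.2.2) _ _ hS)

-- every generated triple has a positive largest member c = m*m + n*n (m ≥ 2)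
theorem triples_c_pos (limit : Int) (ch : PySem.Dict Int (List Int)) :
    ∀ t ∈ triplesB limit ch, 0 < t.2.2 := by
  intro t ht
  rw [triplesB] at ht
  simp only [List.mem_flatMap, List.mem_map, List.mem_filter] at ht
  obtain ⟨m, hm, n, hn, rfl⟩ := ht
  rw [PySem.List.mem_pyRange_one] at hm
  have h2m : 2 ≤ m := hm.1
  dsimp only
  nlinarith

-- ===== VERDICT (by name: the statement is the Claim_ definition above) =====
theorem count_spec : Claim_equal_count := by
  intro limit ch hdom hpre
  unfold Spec_count
  have hl : (0:Int) ≤ limit := hpre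
  have hms : ∀ m ∈ PySem.List.pyRange 2 (isqrtInt limit + 1), 2 ≤ m := by
    intro m hm
    rw [PySem.List.mem_pyRange_one] at hm
    exact hm.1
  have hnd : (PySem.List.pyRange 2 (isqrtInt limit + 1)).Nodup :=
    PySem.List.nodup_pyRange_one _ _
  have hI0 : InvH
      ((PySem.List.pyRange 1 (limit + 1)).foldl (fun d k => d.insert k false) PySem.Dict.empty)
      PySem.Set.empty := by
    refine ⟨?_, List.nodup_nil, ?_⟩
    · exact PySem.Dict.nodup_keys_foldl_insert _ (fun _ _ => false) _ PySem.Dict.nodup_keys_empty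
    · intro i
      rw [getD_false_fold _ _ getD_empty i]
      simp [PySem.Set.empty]
  set ms := PySem.List.pyRange 2 (isqrtInt limit + 1) with hms_def
  obtain ⟨h1, h2, h3⟩ := outer_eq limit hl ms hms (PySem.Dict.ofList ch) 0 _ PySem.Set.empty hI0
  set D := ms.foldl ensure (PySem.Dict.ofList ch) with hD
  have hchB : ms.foldl ensureB (PySem.Dict.ofList ch) = D := by
    rw [hD, ← ensure_eq_ensureB]
  have hTsnd : (ms.foldl (stepT limit) (PySem.Dict.ofList ch, [])).2 = triplesB limit D := by
    rw [stepT_fold_snd limit ms (PySem.Dict.ofList ch) hnd, triplesB, hD, hms_def]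
    rfl
  set T := triplesB limit D with hT
  rw [hTsnd] at h2 h3
  have hcpos := triples_c_pos limit D
  rw [← hT] at hcpos
  have hfilt0 : T.filter (fun t => decide ((1 - 1) * t.2.2 ≤ limit)) = T := by
    apply List.filter_eq_self.mpr
    intro t ht
    simpa using hl
  have hK := PySem.List.le_foldl_max_int T (fun t => PySem.Int.floordiv limit t.2.2) 0
  set K := T.foldl (fun acc t => max acc (PySem.Int.floordiv limit t.2.2)) 0 with hKdef
  have hmemB := mem_levels limit T hcpos (K + 1) 1 le_rfl PySem.Set.empty
  rw [hfilt0] at hmemB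
  have hndB : (((PySem.List.pyRange 1 (K + 1)).foldl (levelStep limit)
      (T, PySem.Set.empty)).2).Nodup :=
    nodup_levels limit _ _ List.nodup_nil
  have hndA : (T.foldl (coverTriple limit) PySem.Set.empty).Nodup := h3.2.1
  have hperm : (T.foldl (coverTriple limit) PySem.Set.empty).Perm
      (((PySem.List.pyRange 1 (K + 1)).foldl (levelStep limit) (T, PySem.Set.empty)).2) := by
    rw [List.perm_ext_iff_of_nodup hndA hndB]
    intro x
    rw [mem_coverTriple_fold, hmemB]
    constructor
    · rintro (hS | ⟨t, ht, k, hk1, hk2, hx⟩)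
      · exact Or.inl hS
      · have hc := hcpos t ht
        have hkc : k * t.2.2 ≤ limit := (PySem.Int.le_floordiv_iff_mul_le hc).mp hk2
        have hkK : PySem.Int.floordiv limit t.2.2 ≤ K := hK.2 t ht
        exact Or.inr ⟨k, hk1, by omega, t, ht, hkc, hx⟩
    · rintro (hS | ⟨k, hk1, hk2, t, ht, hq, hx⟩)
      · exact Or.inl hS
      · have hc := hcpos t ht
        exact Or.inr ⟨t, ht, k, hk1, (PySem.Int.le_floordiv_iff_mul_le hc).mpr hq, hx⟩
  simp only [count, count_alt, ← hms_def, hchB, ← hT, ← hKdef]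
  refine Prod.ext ?_ ?_
  · rw [h2]
    simp
  · rw [sum_values_eq _ _ h3, hperm.length_eq]
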